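-- pv_equiv track=rewrite | github.com/dongh94/Programmers | Python/Level1/옹알이2_String길이/옹알이2.py | ok
-- ===== SOURCE A (Python) =====
-- def ok(babbling):
--     b = ''
--     check = ''
--     for string in babbling:
--         b += string
--         if len(b) == 2 or len(b) == 3:
--             if b == "ye" and check != "ye":
--                 check = "ye"
--                 b = ''
--
--             elif b == "ma" and check != "ma":
--                 check = "ma"
--                 b = ''
--
--             elif b == "aya" and check != "aya":
--                 check = "aya"
--                 b = ''
--
--             elif b == "woo" and check != "woo":
--                 check = "woo"
--                 b = ''
--
--         elif len(b) > 3: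
--             return 0
--
--     if b:
--         return 0
--     else:
--         return 1
-- ===== SOURCE B (Python) =====
-- def ok(babbling):
--     i, n, prev = 0, len(babbling), ''
--     while i < n:
--         two = babbling[i:i+2]
--         three = babbling[i:i+3]
--         if two in ("ye", "ma") and two != prev:
--             prev = two
--             i += 2
--         elif three in ("aya", "woo") and three != prev:
--             prev = three
--             i += 3
--         else:
--             return 0
--     return 1
-- ===== Notes on version B (the rewrite author's own statement) =====
-- stated objective: idiomatic
-- what changed: Replaced A's char-by-char growing buffer with length-2/3 checks by a token-level index scan that matches s[i:i+2] against {'ye','ma'} and s[i:i+3] against {'aya','woo'} and jumps by the token length, tracking only the previous token.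
import Mathlib
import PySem

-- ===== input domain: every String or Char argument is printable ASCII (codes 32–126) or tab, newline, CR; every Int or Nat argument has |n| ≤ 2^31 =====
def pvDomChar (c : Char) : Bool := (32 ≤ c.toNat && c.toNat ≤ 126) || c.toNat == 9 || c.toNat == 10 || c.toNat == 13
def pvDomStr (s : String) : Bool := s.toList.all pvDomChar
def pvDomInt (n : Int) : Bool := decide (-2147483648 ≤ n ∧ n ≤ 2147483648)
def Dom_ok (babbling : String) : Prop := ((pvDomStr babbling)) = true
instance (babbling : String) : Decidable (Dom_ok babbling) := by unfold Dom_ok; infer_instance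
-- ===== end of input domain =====

-- B replaces A's char-by-char growing buffer with an index/suffix scan that jumps token by token (idiomatic, same cost).

-- ===== PORT A =====
-- A's loop: b grows one char per step; at length 2/3 the four token branches fire, length > 3 returns 0.
def okLoop : List Char → List Char → List Char → Int
  | [], b, _check => if b = [] then 1 else 0      -- "if b: return 0 else: return 1"
  | c :: rest, b, check =>
    let b' := b ++ [c]
    if b'.length = 2 ∨ b'.length = 3 then
      if b' = ['y','e'] ∧ check ≠ ['y','e'] then okLoop rest [] ['y','e']
      else if b' = ['m','a'] ∧ check ≠ ['m','a'] then okLoop rest [] ['m','a']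
      else if b' = ['a','y','a'] ∧ check ≠ ['a','y','a'] then okLoop rest [] ['a','y','a']
      else if b' = ['w','o','o'] ∧ check ≠ ['w','o','o'] then okLoop rest [] ['w','o','o']
      else okLoop rest b' check
    else if b'.length > 3 then 0
    else okLoop rest b' check

def ok (babbling : String) : Int := okLoop babbling.toList [] []

-- ===== PORT B =====
-- B's while loop over an index i with prev; here the remaining suffix l stands for i
-- (l = babbling.toList.drop i), so s[i:i+2] = l.take 2, s[i:i+3] = l.take 3, i += k = l.drop k.
def okAltLoop : List Char → List Char → Int
  | [], _prev => 1
  | c :: rest, prev =>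
    let two := (c :: rest).take 2
    let three := (c :: rest).take 3
    if (two = ['y','e'] ∨ two = ['m','a']) ∧ two ≠ prev then
      okAltLoop ((c :: rest).drop 2) two
    else if (three = ['a','y','a'] ∨ three = ['w','o','o']) ∧ three ≠ prev then
      okAltLoop ((c :: rest).drop 3) three
    else 0
  termination_by l _ => l.length
  decreasing_by all_goals simp

def ok_alt (babbling : String) : Int := okAltLoop babbling.toList []

-- ===== PRECONDITION & SPEC =====
def Spec_ok (babbling : String) (out : Int) : Prop := out = ok_alt babbling
instance (babbling : String) (out : Int) : Decidable (Spec_ok babbling out) := by unfold Spec_ok; infer_instance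

-- ===== CLAIM (what is proved, stated in full; the proofs are below) =====
def Claim_equal_ok : Prop := ∀ (babbling : String), Dom_ok babbling → Spec_ok babbling (ok babbling)

-- ===== LEMMAS AND PROOFS =====

theorem key : ∀ (n : Nat) (l prev : List Char), l.length ≤ n → okLoop l [] prev = okAltLoop l prev := by
  intro n
  induction n with
  | zero =>
    intro l prev h
    have : l = [] := List.eq_nil_of_length_eq_zero (Nat.le_zero.mp h)
    subst this
    simp [okLoop, okAltLoop]
  | succ n ih =>
    intro l prev h
    match l with
    | [] => simp [okLoop, okAltLoop]
    | [c] => simp [okLoop, okAltLoop]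
    | c :: d :: rest =>
      have hr : rest.length ≤ n := by simp at h; omega
      by_cases h1 : (c = 'y' ∧ d = 'e') ∧ ¬ prev = ['y','e']
      · obtain ⟨⟨hc, hd⟩, hp⟩ := h1
        subst hc; subst hd
        simp [okLoop, okAltLoop, hp, ih rest ['y','e'] hr]
        exact fun h => absurd h.symm hp
      · by_cases h2 : (c = 'm' ∧ d = 'a') ∧ ¬ prev = ['m','a']
        · obtain ⟨⟨hc, hd⟩, hp⟩ := h2
          subst hc; subst hd
          simp [okLoop, okAltLoop, hp, ih rest ['m','a'] hr]
          exact fun h => absurd h.symm hp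
        · have hB : ¬((c = 'y' ∧ d = 'e' ∨ c = 'm' ∧ d = 'a') ∧ ¬[c, d] = prev) := by
            rintro ⟨⟨rfl, rfl⟩ | ⟨rfl, rfl⟩, hne⟩
            · exact h1 ⟨⟨rfl, rfl⟩, fun hp => hne hp.symm⟩
            · exact h2 ⟨⟨rfl, rfl⟩, fun hp => hne hp.symm⟩
          cases rest with
          | nil => simp [okLoop, okAltLoop, h1, h2, hB]
          | cons e rest3 =>
            have hr3 : rest3.length ≤ n := by simp at hr; omega
            by_cases h3 : (c = 'a' ∧ d = 'y' ∧ e = 'a') ∧ ¬ prev = ['a','y','a']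
            · obtain ⟨⟨hc, hd, he⟩, hp⟩ := h3
              subst hc; subst hd; subst he
              simp [okLoop, okAltLoop, hp, ih rest3 ['a','y','a'] hr3]
              exact fun h => absurd h.symm hp
            · by_cases h4 : (c = 'w' ∧ d = 'o' ∧ e = 'o') ∧ ¬ prev = ['w','o','o']
              · obtain ⟨⟨hc, hd, he⟩, hp⟩ := h4
                subst hc; subst hd; subst he
                simp [okLoop, okAltLoop, hp, ih rest3 ['w','o','o'] hr3]
                exact fun h => absurd h.symm hp
              · have hB3 : ¬((c = 'a' ∧ d = 'y' ∧ e = 'a' ∨ c = 'w' ∧ d = 'o' ∧ e = 'o')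
                    ∧ ¬[c, d, e] = prev) := by
                  rintro ⟨⟨rfl, rfl, rfl⟩ | ⟨rfl, rfl, rfl⟩, hne⟩
                  · exact h3 ⟨⟨rfl, rfl, rfl⟩, fun hp => hne hp.symm⟩
                  · exact h4 ⟨⟨rfl, rfl, rfl⟩, fun hp => hne hp.symm⟩
                cases rest3 with
                | nil => simp [okLoop, okAltLoop, h1, h2, h3, h4, hB, hB3]
                | cons f rest4 => simp [okLoop, okAltLoop, h1, h2, h3, h4, hB, hB3]

-- ===== VERDICT (by name: the statement is the Claim_ definition above) =====
theorem ok_spec : Claim_equal_ok := by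
  intro s _
  unfold Spec_ok ok ok_alt
  exact key s.toList.length s.toList [] (le_refl _)
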